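-- pv_equiv track=rewrite | github.com/wilmurillo-ai/Design-Assistant | .skills/openclaw-skills/skills/nerua1/nerua1-god-mode/scripts/encode.py | fullwidth_mixed
-- ===== SOURCE A (Python) =====
-- FULLWIDTH_MAP = {
--     'a': 'ａ', 'b': 'ｂ', 'c': 'ｃ', 'd': 'ｄ', 'e': 'ｅ',
--     'f': 'ｆ', 'g': 'ｇ', 'h': 'ｈ', 'i': 'ｉ', 'j': 'ｊ',
--     'k': 'ｋ', 'l': 'ｌ', 'm': 'ｍ', 'n': 'ｎ', 'o': 'ｏ',
--     'p': 'ｐ', 'q': 'ｑ', 'r': 'ｒ', 's': 'ｓ', 't': 'ｔ',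
--     'u': 'ｕ', 'v': 'ｖ', 'w': 'ｗ', 'x': 'ｘ', 'y': 'ｙ', 'z': 'ｚ'
-- }
--
-- def fullwidth_mixed(text):
--     result = []
--     for i, c in enumerate(text):
--         if i % 2 == 0:
--             result.append(FULLWIDTH_MAP.get(c.lower(), c.upper()))
--         else:
--             result.append(c.lower())
--     return ''.join(result)
-- ===== SOURCE B (Python) =====
-- def fullwidth_mixed(text):
--     out = []
--     i = 0
--     n = len(text)
--     while i < n:
--         c = text[i].lower()
--         if 'a' <= c <= 'z':
--             out.append(chr(0xFF41 + ord(c) - 97))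
--         else:
--             out.append(text[i].upper())
--         if i + 1 < n:
--             out.append(text[i + 1].lower())
--         i += 2
--     return ''.join(out)
-- ===== Notes on version B (the rewrite author's own statement) =====
-- stated objective: alternative
-- what changed: Replaces the 26-entry FULLWIDTH_MAP dict lookup with a closed-form codepoint computation (chr(0xFF41 + ord(c)-97)) and replaces the enumerate-with-parity loop by a two-characters-per-step while loop, so no index parity test and no table remain.
import Mathlib
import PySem

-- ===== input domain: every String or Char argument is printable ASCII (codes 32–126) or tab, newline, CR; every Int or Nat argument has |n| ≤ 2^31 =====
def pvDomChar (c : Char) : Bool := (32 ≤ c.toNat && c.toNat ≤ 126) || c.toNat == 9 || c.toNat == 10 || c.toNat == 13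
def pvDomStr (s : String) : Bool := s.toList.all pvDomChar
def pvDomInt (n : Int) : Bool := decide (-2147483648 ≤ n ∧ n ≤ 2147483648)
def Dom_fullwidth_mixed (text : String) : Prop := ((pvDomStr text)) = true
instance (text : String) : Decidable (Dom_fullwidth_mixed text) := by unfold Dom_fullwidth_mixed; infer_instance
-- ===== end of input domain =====

-- B replaces A's 26-entry fullwidth table with a closed-form codepoint formula and
-- A's enumerate-with-parity loop with a two-characters-per-step loop (objective: alternative).

-- ===== PORT A =====
def fwMap : PySem.Dict String String := PySem.Dict.ofList
  [("a","ａ"), ("b","ｂ"), ("c","ｃ"), ("d","ｄ"), ("e","ｅ"),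
   ("f","ｆ"), ("g","ｇ"), ("h","ｈ"), ("i","ｉ"), ("j","ｊ"),
   ("k","ｋ"), ("l","ｌ"), ("m","ｍ"), ("n","ｎ"), ("o","ｏ"),
   ("p","ｐ"), ("q","ｑ"), ("r","ｒ"), ("s","ｓ"), ("t","ｔ"),
   ("u","ｕ"), ("v","ｖ"), ("w","ｗ"), ("x","ｘ"), ("y","ｙ"), ("z","ｚ")]

def fullwidth_mixed (text : String) : String :=
  let result := (PySem.List.enumerate text.toList 0).foldl
    (fun (res : List String) (ic : Int × Char) =>
      if ic.1 % 2 == 0 then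
        res ++ [fwMap.getD (PySem.Str.lower (String.ofList [ic.2])) (PySem.Str.upper (String.ofList [ic.2]))]
      else
        res ++ [PySem.Str.lower (String.ofList [ic.2])]) []
  PySem.Str.join "" result

-- ===== PORT B =====
def fwEvenChar (c : Char) : Char :=
  let l := PySem.Chars.lowerChar c
  if 'a' ≤ l ∧ l ≤ 'z' then Char.ofNat (0xFF41 + l.toNat - 97) else PySem.Chars.upperChar c

def fwAltGo : List Char → List Char
  | [] => []
  | [c] => [fwEvenChar c]
  | c :: d :: rest => fwEvenChar c :: PySem.Chars.lowerChar d :: fwAltGo rest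

def fullwidth_mixed_alt (text : String) : String := String.ofList (fwAltGo text.toList)

-- ===== PRECONDITION & SPEC =====
def Spec_fullwidth_mixed (text : String) (out : String) : Prop := out = fullwidth_mixed_alt text
instance (text : String) (out : String) : Decidable (Spec_fullwidth_mixed text out) := by unfold Spec_fullwidth_mixed; infer_instance

-- ===== CLAIM (what is proved, stated in full; the proofs are below) =====
def Claim_equal_fullwidth_mixed : Prop := ∀ (text : String), Dom_fullwidth_mixed text → Spec_fullwidth_mixed text (fullwidth_mixed text)

-- ===== LEMMAS AND PROOFS =====

-- per-character facts, checked over all 128 ASCII codes by `decide`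
set_option maxRecDepth 4000 in
lemma fw_perchar_even : ∀ n ∈ List.range 128,
    fwMap.getD (PySem.Str.lower (String.ofList [Char.ofNat n])) (PySem.Str.upper (String.ofList [Char.ofNat n]))
      = String.ofList [fwEvenChar (Char.ofNat n)] := by decide

set_option maxRecDepth 4000 in
lemma fw_perchar_odd : ∀ n ∈ List.range 128,
    PySem.Str.lower (String.ofList [Char.ofNat n]) = String.ofList [PySem.Chars.lowerChar (Char.ofNat n)] := by
  decide

lemma fw_even_of_dom (c : Char) (h : pvDomChar c = true) :
    fwMap.getD (PySem.Str.lower (String.ofList [c])) (PySem.Str.upper (String.ofList [c]))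
      = String.ofList [fwEvenChar c] := by
  have hlt : c.toNat < 128 := by
    simp [pvDomChar] at h; omega
  have := fw_perchar_even c.toNat (List.mem_range.mpr hlt)
  simpa [Char.ofNat_toNat] using this

lemma fw_odd_of_dom (c : Char) (h : pvDomChar c = true) :
    PySem.Str.lower (String.ofList [c]) = String.ofList [PySem.Chars.lowerChar c] := by
  have hlt : c.toNat < 128 := by
    simp [pvDomChar] at h; omega
  have := fw_perchar_odd c.toNat (List.mem_range.mpr hlt)
  simpa [Char.ofNat_toNat] using this

-- A's fold, generalized over the accumulator and the start index
lemma fwA_fold_eq (l : List Char) (i : Int) (hi : i % 2 = 0)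
    (hdom : ∀ c ∈ l, pvDomChar c = true) (res : List String) :
    (PySem.List.enumerate l i).foldl
      (fun (res : List String) (ic : Int × Char) =>
        if ic.1 % 2 == 0 then
          res ++ [fwMap.getD (PySem.Str.lower (String.ofList [ic.2])) (PySem.Str.upper (String.ofList [ic.2]))]
        else
          res ++ [PySem.Str.lower (String.ofList [ic.2])]) res
      = res ++ (fwAltGo l).map (fun c => String.ofList [c]) := by
  induction l using fwAltGo.induct generalizing i res with
  | case1 => simp [PySem.List.enumerate_nil, fwAltGo]
  | case2 c =>
    have h1 : (i % 2 == 0) = true := by simpa using hi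
    simp only [PySem.List.enumerate_cons, PySem.List.enumerate_nil, List.foldl_cons,
      List.foldl_nil, h1, if_true]
    simp [fwAltGo, fw_even_of_dom c (hdom c (by simp))]
  | case3 c d rest ih =>
    have h1 : (i % 2 == 0) = true := by simpa using hi
    have h2 : ((i + 1) % 2 == 0) = false := by
      simp only [beq_eq_false_iff_ne, ne_eq]
      omega
    have h3 : (i + 2) % 2 = 0 := by omega
    have hdc : pvDomChar c = true := hdom c (by simp)
    have hdd : pvDomChar d = true := hdom d (by simp)
    have hrest : ∀ x ∈ rest, pvDomChar x = true := fun x hx => hdom x (by simp [hx])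
    simp only [PySem.List.enumerate_cons, List.foldl_cons, h1, h2, if_true,
      fw_even_of_dom c hdc, fw_odd_of_dom d hdd]
    rw [show i + 1 + 1 = i + 2 by ring, ih (i + 2) h3 hrest]
    simp [fwAltGo]

lemma fw_join_singletons (cs : List Char) :
    PySem.Str.join "" (cs.map (fun c => String.ofList [c])) = String.ofList cs := by
  have h : (PySem.Str.join "" (cs.map (fun c => String.ofList [c]))).toList = cs := by
    simp [PySem.Str.toList_join, List.map_map, Function.comp_def,
      PySem.Chars.join_nil_singletons]
  apply String.toList_inj.mp
  simpa using h

-- ===== VERDICT (by name: the statement is the Claim_ definition above) =====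
theorem fullwidth_mixed_spec : Claim_equal_fullwidth_mixed := by
  intro text hdom
  unfold Spec_fullwidth_mixed fullwidth_mixed fullwidth_mixed_alt
  have hall : ∀ c ∈ text.toList, pvDomChar c = true := by
    simpa [Dom_fullwidth_mixed, pvDomStr, List.all_eq_true] using hdom
  rw [fwA_fold_eq text.toList 0 rfl hall []]
  simp [fw_join_singletons]
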